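-- pv_equiv track=rewrite | github.com/ninepig/leecode_dd_2024 | zAmazon/oa/zmethodExplained/countMaxNumTeamsHackthon.py | countMaxNumTeams
-- ===== SOURCE A (Python) =====
-- def countMaxNumTeams(skills:list[int],teamSize:int,maxDiff:int):
--     skills.sort()
--     n = len(skills)
--     teamCount = 0
--     i = 0
--
--     while i + teamSize - 1 < n:
--         if skills[i + teamSize - 1]  - skills[i] <= maxDiff:
--             teamCount += 1
--             i += teamSize
--         else:
--             i += 1
--
--     return teamCount
-- ===== SOURCE B (Python) =====
-- def countMaxNumTeams(skills: list[int], teamSize: int, maxDiff: int):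
--     skills.sort()
--     count = 0
--     left = 0
--     for right in range(len(skills)):
--         while left < right and skills[right] - skills[left] > maxDiff:
--             left += 1
--         if right - left + 1 == teamSize and skills[right] - skills[left] <= maxDiff:
--             count += 1
--             left = right + 1
--     return count
-- ===== Notes on version B (the rewrite author's own statement) =====
-- stated objective: alternative
-- what changed: Replaces A's fixed-offset greedy scan (probe skills[i+teamSize-1]-skills[i], jump by teamSize or 1) with a two-pointer sliding window whose left boundary advances while the window is too wide and which counts and resets when the window size hits teamSize.
import Mathlib
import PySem

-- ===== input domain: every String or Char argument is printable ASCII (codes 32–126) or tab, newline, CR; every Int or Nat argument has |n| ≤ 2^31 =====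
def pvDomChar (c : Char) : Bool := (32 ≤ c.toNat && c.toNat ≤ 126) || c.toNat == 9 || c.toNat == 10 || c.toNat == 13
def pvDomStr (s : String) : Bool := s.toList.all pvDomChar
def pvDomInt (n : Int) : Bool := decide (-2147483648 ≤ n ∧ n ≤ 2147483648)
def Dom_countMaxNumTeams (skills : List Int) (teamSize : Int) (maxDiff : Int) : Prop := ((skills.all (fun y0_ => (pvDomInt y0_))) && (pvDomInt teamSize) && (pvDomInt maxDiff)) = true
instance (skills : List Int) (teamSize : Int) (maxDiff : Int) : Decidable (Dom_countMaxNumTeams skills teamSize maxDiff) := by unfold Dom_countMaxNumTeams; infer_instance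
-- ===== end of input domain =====

-- B replaces A's probe-a-fixed-offset-and-jump greedy loop by a two-pointer sliding
-- window over the same sorted list (objective: alternative decomposition, same cost).
-- Both A and B sort `skills` in place (skills.sort()); the equivalence proved here is
-- about the RETURN value (the mutation is identical in both).

-- ===== PORT A =====
-- skills[j] for an index j; inside Pre_ every index used is in range, where pyGetD is
-- exact (Python would raise IndexError out of range; that never happens under Pre_).
def pvGet (s : List Int) (i : Int) : Int := PySem.List.pyGetD s i 0

-- the while loop of A; the `1 ≤ t` conjunct is ONLY a totality guard (for t ≤ 0 the
-- Python loop diverges or raises; such inputs are outside Pre_).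
def pvALoop (s : List Int) (n t d i count : Int) : Int :=
  if h : 1 ≤ t ∧ i + t - 1 < n then
    if pvGet s (i + t - 1) - pvGet s i ≤ d then
      pvALoop s n t d (i + t) (count + 1)
    else
      pvALoop s n t d (i + 1) count
  else count
termination_by (n - i).toNat
decreasing_by all_goals omega

def countMaxNumTeams (skills : List Int) (teamSize : Int) (maxDiff : Int) : Int :=
  let s := PySem.List.sorted skills (fun x => x) false
  pvALoop s (s.length : Int) teamSize maxDiff 0 0

-- ===== PORT B =====
-- the inner `while left < right and skills[right] - skills[left] > maxDiff: left += 1`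
def pvAdvance (s : List Int) (d r l : Int) : Int :=
  if h : l < r ∧ pvGet s r - pvGet s l > d then
    pvAdvance s d r (l + 1)
  else l
termination_by (r - l).toNat
decreasing_by omega

-- one iteration of B's for-loop; state = (left, count)
def pvBStep (s : List Int) (t d : Int) (st : Int × Int) (r : Int) : Int × Int :=
  let l := pvAdvance s d r st.1
  if r - l + 1 = t ∧ pvGet s r - pvGet s l ≤ d then (r + 1, st.2 + 1) else (l, st.2)

def countMaxNumTeams_alt (skills : List Int) (teamSize : Int) (maxDiff : Int) : Int :=
  let s := PySem.List.sorted skills (fun x => x) false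
  ((PySem.List.pyRange 0 (s.length : Int) 1).foldl (pvBStep s teamSize maxDiff) (0, 0)).2

-- ===== PRECONDITION & SPEC =====
-- Pre_ excludes teamSize ≤ 0: there A never returns (it raises IndexError or loops
-- forever, since i then fails to advance past the window check).
def Pre_countMaxNumTeams (skills : List Int) (teamSize : Int) (maxDiff : Int) : Prop :=
  1 ≤ teamSize
instance (skills : List Int) (teamSize : Int) (maxDiff : Int) : Decidable (Pre_countMaxNumTeams skills teamSize maxDiff) := by unfold Pre_countMaxNumTeams; infer_instance

def pvWitness_countMaxNumTeams : List Int × Int × Int := ([4, 1, 3, 2], 2, 1)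

def Spec_countMaxNumTeams (skills : List Int) (teamSize : Int) (maxDiff : Int) (out : Int) : Prop := out = countMaxNumTeams_alt skills teamSize maxDiff
instance (skills : List Int) (teamSize : Int) (maxDiff : Int) (out : Int) : Decidable (Spec_countMaxNumTeams skills teamSize maxDiff out) := by unfold Spec_countMaxNumTeams; infer_instance

-- ===== CLAIM (what is proved, stated in full; the proofs are below) =====
def Claim_equal_countMaxNumTeams : Prop := ∀ (skills : List Int) (teamSize : Int) (maxDiff : Int), Dom_countMaxNumTeams skills teamSize maxDiff → Pre_countMaxNumTeams skills teamSize maxDiff → Spec_countMaxNumTeams skills teamSize maxDiff (countMaxNumTeams skills teamSize maxDiff)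

-- ===== LEMMAS AND PROOFS =====

-- sorted access is monotone in the index
theorem pvGet_mono (s : List Int) (hs : s.Pairwise (· ≤ ·)) (i j : Int)
    (h0 : 0 ≤ i) (hij : i ≤ j) (hj : j < (s.length : Int)) : pvGet s i ≤ pvGet s j := by
  have ei := PySem.List.pyGetD_eq_getElem s (i := i) 0 h0 (by omega)
  have ej := PySem.List.pyGetD_eq_getElem s (i := j) 0 (by omega) hj
  unfold pvGet
  rw [ei, ej]
  rcases eq_or_lt_of_le hij with h | h
  · subst h; exact le_refl _
  · exact (List.pairwise_iff_getElem.mp hs) i.toNat j.toNat (by omega) (by omega) (by omega)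

-- the count accumulator of A's loop is a pure offset
theorem pvALoop_shift (s : List Int) (n t d : Int) :
    ∀ k (i c : Int), (n - i).toNat ≤ k →
      pvALoop s n t d i c = c + pvALoop s n t d i 0 := by
  intro k
  induction k with
  | zero =>
    intro i c h
    conv_lhs => rw [pvALoop]
    conv_rhs => rw [pvALoop]
    split_ifs with hg hv <;> omega
  | succ k ih =>
    intro i c h
    conv_lhs => rw [pvALoop]
    conv_rhs => rw [pvALoop]
    split_ifs with hg hv
    · rw [ih (i + t) (c + 1) (by omega), ih (i + t) (0 + 1) (by omega)]; ring
    · rw [ih (i + 1) c (by omega)]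
    · omega

-- if every remaining full window is too wide, A's loop counts nothing
theorem pvALoop_zero (s : List Int) (n t d : Int) :
    ∀ k (l : Int), (n - l).toNat ≤ k →
      (∀ i : Int, l ≤ i → i + t - 1 < n → pvGet s (i + t - 1) - pvGet s i > d) →
      pvALoop s n t d l 0 = 0 := by
  intro k
  induction k with
  | zero =>
    intro l h hinv
    conv_lhs => rw [pvALoop]
    split_ifs with hg hv
    · omega
    · omega
    · rfl
  | succ k ih =>
    intro l h hinv
    conv_lhs => rw [pvALoop]
    split_ifs with hg hv
    · exact absurd hv (by have := hinv l (le_refl l) hg.2; omega)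
    · exact ih (l + 1) (by omega) (fun i hi hw => hinv i (by omega) hw)
    · rfl

-- the two-pointer advance: stays in [l, r], preserves A's remaining count, and stops
-- either at r or at a window within maxDiff
theorem pvAdvance_spec (s : List Int) (hs : s.Pairwise (· ≤ ·)) (t d : Int) (ht : 1 ≤ t)
    (r : Int) (hr : r < (s.length : Int)) :
    ∀ k (l : Int), (r - l).toNat ≤ k → 0 ≤ l → l ≤ r →
      (∀ i : Int, l ≤ i → i + t - 1 < r → pvGet s (i + t - 1) - pvGet s i > d) →
      l ≤ pvAdvance s d r l ∧ pvAdvance s d r l ≤ r ∧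
      pvALoop s (s.length : Int) t d (pvAdvance s d r l) 0 = pvALoop s (s.length : Int) t d l 0 ∧
      (pvAdvance s d r l = r ∨ pvGet s r - pvGet s (pvAdvance s d r l) ≤ d) := by
  intro k
  induction k with
  | zero =>
    intro l hk h0 hlr hinv
    rw [pvAdvance]
    split_ifs with hg
    · exact absurd hg.1 (by omega)
    · refine ⟨le_refl _, hlr, rfl, ?_⟩
      rcases lt_or_ge l r with h | h
      · right; by_contra hc; exact hg ⟨h, by omega⟩
      · left; omega
  | succ k ih =>
    intro l hk h0 hlr hinv
    rw [pvAdvance]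
    split_ifs with hg
    · have key : pvALoop s (s.length : Int) t d l 0 = pvALoop s (s.length : Int) t d (l + 1) 0 := by
        conv_lhs => rw [pvALoop]
        split_ifs with hg2 hv
        · -- window starting at l valid: impossible
          exfalso
          rcases lt_or_ge (l + t - 1) r with hw | hw
          · have := hinv l (le_refl l) hw; omega
          · have hmono : pvGet s r ≤ pvGet s (l + t - 1) :=
              pvGet_mono s hs r (l + t - 1) (by omega) hw hg2.2
            omega
        · rfl
        · conv_rhs => rw [pvALoop]
          split_ifs with hg3 hv3
          · exact absurd hg3 (by omega)
          · exact absurd hg3 (by omega)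
          · rfl
      have := ih (l + 1) (by omega) (by omega) (by omega)
        (fun i hi hw => hinv i (by omega) hw)
      exact ⟨by omega, this.2.1, by rw [this.2.2.1, ← key], this.2.2.2⟩
    · refine ⟨le_refl _, hlr, rfl, ?_⟩
      rcases lt_or_ge l r with h | h
      · right; by_contra hc; exact hg ⟨h, by omega⟩
      · left; omega

-- loop invariant carrying B's fold to A's count
theorem pvFold_inv (s : List Int) (hs : s.Pairwise (· ≤ ·)) (t d : Int) (ht : 1 ≤ t) :
    ∀ k (r l c : Int), ((s.length : Int) - r).toNat ≤ k → 0 ≤ l → l ≤ r →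
      r ≤ (s.length : Int) → r - l ≤ t →
      (∀ i : Int, l ≤ i → i + t - 1 < r → pvGet s (i + t - 1) - pvGet s i > d) →
      ((PySem.List.pyRange r (s.length : Int) 1).foldl (pvBStep s t d) (l, c)).2
        = c + pvALoop s (s.length : Int) t d l 0 := by
  intro k
  induction k with
  | zero =>
    intro r l c hk h0 hlr hrn hsz hinv
    have hrn' : r = (s.length : Int) := by omega
    rw [hrn', PySem.List.pyRange_one_eq_nil (le_refl _)]
    simp only [List.foldl_nil]
    have : pvALoop s (s.length : Int) t d l 0 = 0 :=
      pvALoop_zero s (s.length : Int) t d ((s.length : Int) - l).toNat l (le_refl _)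
        (fun i hi hw => hinv i hi (by omega))
    omega
  | succ k ih =>
    intro r l c hk h0 hlr hrn hsz hinv
    rcases eq_or_lt_of_le hrn with hE | hrlt
    · rw [hE, PySem.List.pyRange_one_eq_nil (le_refl _)]
      simp only [List.foldl_nil]
      have : pvALoop s (s.length : Int) t d l 0 = 0 :=
        pvALoop_zero s (s.length : Int) t d ((s.length : Int) - l).toNat l (le_refl _)
          (fun i hi hw => hinv i hi (by omega))
      omega
    · rw [PySem.List.pyRange_one_cons hrlt, List.foldl_cons]
      obtain ⟨hadv1, hadv2, hadv3, hadv4⟩ :=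
        pvAdvance_spec s hs t d ht r hrlt ((r - l).toNat) l (le_refl _) h0 hlr hinv
      set l' := pvAdvance s d r l with hl'
      -- size after advance is at most t
      have hsz' : r - l' ≤ t - 1 := by
        rcases lt_or_ge (r - l) t with h | h
        · omega
        · -- r - l = t: the advance must take at least one step
          have hmove : l + 1 ≤ l' := by
            have hw : pvGet s (r - 1) - pvGet s l > d := by
              have h1 := hinv l (le_refl l) (by omega)
              have e : l + t - 1 = r - 1 := by omega
              rw [e] at h1; exact h1
            have hmono : pvGet s (r - 1) ≤ pvGet s r :=
              pvGet_mono s hs (r - 1) r (by omega) (by omega) hrlt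
            rw [hl', pvAdvance, dif_pos (⟨by omega, by omega⟩ : l < r ∧ pvGet s r - pvGet s l > d)]
            exact (pvAdvance_spec s hs t d ht r hrlt ((r - (l + 1)).toNat) (l + 1)
              (le_refl _) (by omega) (by omega) (fun i hi hw => hinv i (by omega) hw)).1
          omega
      -- one step of B
      have estep : pvBStep s t d (l, c) r =
          if r - l' + 1 = t ∧ pvGet s r - pvGet s l' ≤ d then (r + 1, c + 1) else (l', c) := by
        rw [pvBStep]
      rw [estep]
      split_ifs with hteam
      · -- a team is formed at [l', r]
        have hstep : pvALoop s (s.length : Int) t d l' 0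
            = 1 + pvALoop s (s.length : Int) t d (r + 1) 0 := by
          conv_lhs => rw [pvALoop]
          rw [dif_pos (⟨ht, by omega⟩ : 1 ≤ t ∧ l' + t - 1 < (s.length : Int))]
          have e : l' + t - 1 = r := by omega
          rw [e, if_pos hteam.2]
          have e2 : l' + t = r + 1 := by omega
          rw [e2, pvALoop_shift s (s.length : Int) t d
            ((s.length : Int) - (r + 1)).toNat (r + 1) (0 + 1) (le_refl _)]
          ring
        rw [ih (r + 1) (r + 1) (c + 1) (by omega) (by omega) (le_refl _) (by omega)
          (by omega) (fun i hi hw => by omega)]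
        rw [hadv3] at hstep
        omega
      · -- no team ends at r
        have hinv' : ∀ i : Int, l' ≤ i → i + t - 1 < r + 1 →
            pvGet s (i + t - 1) - pvGet s i > d := by
          intro i hi hw
          rcases lt_or_ge (i + t - 1) r with h | h
          · exact hinv i (by omega) h
          · have hi' : i = l' := by omega
            have e : i + t - 1 = r := by omega
            subst hi'
            rw [e]
            by_contra hc
            exact hteam ⟨by omega, by omega⟩
        rw [ih (r + 1) l' c (by omega) (by omega) (by omega) (by omega) (by omega) hinv']
        rw [hadv3]

-- ===== VERDICT (by name: the statement is the Claim_ definition above) =====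
theorem countMaxNumTeams_spec : Claim_equal_countMaxNumTeams := by
  intro skills t d _ hpre
  have ht : 1 ≤ t := hpre
  show countMaxNumTeams skills t d = countMaxNumTeams_alt skills t d
  have hs : (PySem.List.sorted skills (fun x => x) false).Pairwise (· ≤ ·) :=
    PySem.List.sorted_pairwise skills (fun x => x)
  set S := PySem.List.sorted skills (fun x => x) false with hS
  have eA : countMaxNumTeams skills t d = pvALoop S (S.length : Int) t d 0 0 := rfl
  have eB : countMaxNumTeams_alt skills t d =
      ((PySem.List.pyRange 0 (S.length : Int) 1).foldl (pvBStep S t d) (0, 0)).2 := rfl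
  rw [eA, eB]
  have := pvFold_inv S hs t d ht ((S.length : Int) - 0).toNat 0 0 0 (le_refl _)
    (le_refl _) (le_refl _) (by positivity) (by omega) (fun i hi hw => by omega)
  omega
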